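-- pv_equiv track=rewrite | github.com/albins/thesis-2017 | analysis.py | count_bad_blocks
-- ===== SOURCE A (Python) =====
-- from collections import Counter, defaultdict
--
-- def count_bad_blocks(results):
--     """
--     Returns: cluster => disk => bad block count
--     """
--
--     faults = defaultdict(lambda: defaultdict(lambda: defaultdict(list)))
--
--     for ts, cluster, disk, block in results:
--         faults[cluster][disk][block].append(ts)
--
--     counter = defaultdict(Counter)
--     for cluster, disk_data in faults.items():
--         for disk_name, bad_blocks in disk_data.items():
--             counter[cluster][disk_name] += len(bad_blocks.keys())
--     return counter
-- ===== SOURCE B (Python) =====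
-- from collections import Counter, defaultdict
--
-- def count_bad_blocks(results):
--     """
--     Returns: cluster => disk => bad block count
--     """
--     seen = set()
--     counter = defaultdict(Counter)
--     for ts, cluster, disk, block in results:
--         triple = (cluster, disk, block)
--         if triple not in seen:
--             seen.add(triple)
--             counter[cluster][disk] += 1
--     return counter
-- ===== Notes on version B (the rewrite author's own statement) =====
-- stated objective: simpler
-- what changed: Replaces A's nested dict-of-dict-of-timestamp-lists plus a second nested counting pass by a single pass that deduplicates (cluster, disk, block) triples in one flat set and increments the counter directly.
import Mathlib
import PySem

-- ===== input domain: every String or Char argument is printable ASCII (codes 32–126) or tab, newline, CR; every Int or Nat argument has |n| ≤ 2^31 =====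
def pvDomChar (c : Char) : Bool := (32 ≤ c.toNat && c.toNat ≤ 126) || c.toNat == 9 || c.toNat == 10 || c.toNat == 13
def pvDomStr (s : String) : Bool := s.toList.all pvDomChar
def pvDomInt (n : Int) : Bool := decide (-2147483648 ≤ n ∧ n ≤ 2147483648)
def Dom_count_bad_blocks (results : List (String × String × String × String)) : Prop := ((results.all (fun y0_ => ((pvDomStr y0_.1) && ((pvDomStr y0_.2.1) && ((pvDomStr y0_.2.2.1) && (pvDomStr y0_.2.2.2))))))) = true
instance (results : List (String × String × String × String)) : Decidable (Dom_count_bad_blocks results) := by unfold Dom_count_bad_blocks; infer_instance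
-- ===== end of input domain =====

-- B replaces A's nested dict of timestamp lists plus second nested counting pass by one pass
-- over results with a flat set of (cluster, disk, block) triples (objective: simpler).

-- ===== PORT A =====
def count_bad_blocks (results : List (String × String × String × String)) : List (String × List (String × Int)) :=
  let faults : PySem.Dict String (PySem.Dict String (PySem.Dict String (List String))) :=
    results.foldl (fun f r =>
      f.modify r.2.1 PySem.Dict.empty (fun dd =>
        dd.modify r.2.2.1 PySem.Dict.empty (fun bb =>
          bb.modify r.2.2.2 [] (fun tss => tss ++ [r.1])))) PySem.Dict.empty
  let counter : PySem.Dict String (PySem.Dict String Int) :=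
    faults.items.foldl (fun ctr p =>
      p.2.items.foldl (fun ctr q =>
        ctr.modify p.1 PySem.Dict.empty (fun cc =>
          cc.modify q.1 0 (fun n => n + (q.2.keys.length : Int)))) ctr) PySem.Dict.empty
  counter.items.map (fun p => (p.1, p.2.items))

-- ===== PORT B =====
def count_bad_blocks_alt (results : List (String × String × String × String)) : List (String × List (String × Int)) :=
  let st : PySem.Set (String × String × String) × PySem.Dict String (PySem.Dict String Int) :=
    results.foldl (fun st r =>
      let triple : String × String × String := (r.2.1, r.2.2.1, r.2.2.2)
      if st.1.contains triple then st
      else (st.1.add triple,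
            st.2.modify r.2.1 PySem.Dict.empty (fun cc => cc.modify r.2.2.1 0 (fun n => n + 1))))
      (([] : PySem.Set (String × String × String)), PySem.Dict.empty)
  st.2.items.map (fun p => (p.1, p.2.items))

-- ===== PRECONDITION & SPEC =====
def Spec_count_bad_blocks (results : List (String × String × String × String)) (out : List (String × List (String × Int))) : Prop := out = count_bad_blocks_alt results
instance (results : List (String × String × String × String)) (out : List (String × List (String × Int))) : Decidable (Spec_count_bad_blocks results out) := by unfold Spec_count_bad_blocks; infer_instance

-- ===== CLAIM (what is proved, stated in full; the proofs are below) =====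
def Claim_equal_count_bad_blocks : Prop := ∀ (results : List (String × String × String × String)), Dom_count_bad_blocks results → Spec_count_bad_blocks results (count_bad_blocks results)

-- ===== LEMMAS AND PROOFS =====

def pvIns3 (ks : List String) (b : String) : List String :=
  if ks.contains b then ks else ks ++ [b]

def pvLk2 (l : List (String × List String)) (d : String) : List String :=
  ((l.find? (fun q => q.1 == d)).map (fun q => q.2)).getD []

def pvIns2 (l : List (String × List String)) (d b : String) : List (String × List String) :=
  if l.any (fun q => q.1 == d) then
    l.map (fun q => if q.1 == d then (d, pvIns3 (pvLk2 l d) b) else q)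
  else l ++ [(d, [b])]

def pvShape2 (dd : PySem.Dict String (PySem.Dict String (List String))) : List (String × List String) :=
  dd.items.map (fun q => (q.1, q.2.keys))

-- basic dict facts
theorem contains_eq_any {β : Type} (d : PySem.Dict String β) (k : String) :
    d.contains k = d.items.any (fun p => p.1 == k) := rfl

theorem get?_eq_find? {β : Type} (d : PySem.Dict String β) (k : String) :
    d.get? k = (d.items.find? (fun p => p.1 == k)).map (fun p => p.2) := rfl

theorem getD_of_not_any {β : Type} (d : PySem.Dict String β) (k : String) (dflt : β)
    (h : d.items.any (fun p => p.1 == k) = false) : d.getD k dflt = dflt := by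
  have : d.items.find? (fun p => p.1 == k) = none := by
    rw [List.find?_eq_none]
    intro x hx
    have := List.any_eq_false.mp h x hx
    simp [this]
  simp [PySem.Dict.getD, get?_eq_find?, this]

theorem items_modify {β : Type} (d : PySem.Dict String β) (k : String) (dflt : β) (f : β → β) :
    (d.modify k dflt f).items =
      if d.items.any (fun p => p.1 == k)
      then d.items.map (fun p => if p.1 == k then (k, f (d.getD k dflt)) else p)
      else d.items ++ [(k, f dflt)] := by
  simp only [PySem.Dict.modify, PySem.Dict.insert, contains_eq_any]
  by_cases h : d.items.any (fun p => p.1 == k) = true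
  · simp only [h, if_true]
  · have h' := eq_false_of_ne_true h
    rw [if_neg h, if_neg h, getD_of_not_any d k dflt h']

theorem keys_modify_app (bb : PySem.Dict String (List String)) (b ts : String) :
    (bb.modify b [] (fun l => l ++ [ts])).keys = pvIns3 bb.keys b := by
  have hc : (List.map (fun (x : String × List String) => x.1) bb.items).contains b = bb.items.any (fun p => p.1 == b) := by
    rw [Bool.eq_iff_iff]
    simp only [List.contains_eq_mem, List.mem_map, decide_eq_true_eq, List.any_eq_true, beq_iff_eq]
  unfold pvIns3
  simp only [PySem.Dict.keys, items_modify, hc]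
  by_cases h : bb.items.any (fun p => p.1 == b) = true
  · rw [if_pos h, if_pos h, List.map_map]
    apply List.map_congr_left
    intro p _
    by_cases hp : p.1 = b
    · simp [hp]
    · simp [hp]
  · rw [if_neg h, if_neg h]
    simp

theorem lk2_shape2 (dd : PySem.Dict String (PySem.Dict String (List String))) (d : String) :
    pvLk2 (pvShape2 dd) d = (dd.getD d PySem.Dict.empty).keys := by
  unfold pvLk2 pvShape2 PySem.Dict.getD
  rw [get?_eq_find?, List.find?_map]
  have hco : ((fun (q : String × List String) => q.1 == d) ∘ (fun (q : String × PySem.Dict String (List String)) => (q.1, q.2.keys))) = (fun q => q.1 == d) := rfl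
  rw [hco]
  rcases h : dd.items.find? (fun q => q.1 == d) with _ | q0
  · simp [h, PySem.Dict.empty, PySem.Dict.keys]
  · simp [h]

theorem any_shape2 (dd : PySem.Dict String (PySem.Dict String (List String))) (d : String) :
    (pvShape2 dd).any (fun q => q.1 == d) = dd.items.any (fun q => q.1 == d) := by
  unfold pvShape2
  rw [List.any_map]
  rfl

theorem shape2_modify (dd : PySem.Dict String (PySem.Dict String (List String))) (d b ts : String) :
    pvShape2 (dd.modify d PySem.Dict.empty (fun bb => bb.modify b [] (fun l => l ++ [ts]))) =
      pvIns2 (pvShape2 dd) d b := by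
  conv_lhs => rw [pvShape2, items_modify]
  rw [pvIns2, any_shape2]
  by_cases h : dd.items.any (fun q => q.1 == d) = true
  · rw [if_pos h, if_pos h]
    simp only [pvShape2, List.map_map]
    apply List.map_congr_left
    intro q _
    by_cases hq : q.1 = d
    · simp only [Function.comp_apply, hq, beq_self_eq_true, if_true]
      rw [keys_modify_app]
      exact congrArg (fun ks => (d, pvIns3 ks b)) (lk2_shape2 dd d).symm
    · simp [Function.comp, hq]
  · rw [if_neg h, if_neg h]
    simp only [List.map_append]
    rw [pvShape2]
    congr 1

def pvLk1 (g : List (String × List (String × List String))) (c : String) : List (String × List String) :=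
  ((g.find? (fun p => p.1 == c)).map (fun p => p.2)).getD []

def pvIns (g : List (String × List (String × List String))) (c d b : String) : List (String × List (String × List String)) :=
  if g.any (fun p => p.1 == c) then
    g.map (fun p => if p.1 == c then (c, pvIns2 (pvLk1 g c) d b) else p)
  else g ++ [(c, [(d, [b])])]

def pvShapeF (f : PySem.Dict String (PySem.Dict String (PySem.Dict String (List String)))) : List (String × List (String × List String)) :=
  f.items.map (fun p => (p.1, pvShape2 p.2))

def pvInsF (f : PySem.Dict String (PySem.Dict String (PySem.Dict String (List String)))) (r : String × String × String × String) : PySem.Dict String (PySem.Dict String (PySem.Dict String (List String))) :=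
  f.modify r.2.1 PySem.Dict.empty (fun dd =>
    dd.modify r.2.2.1 PySem.Dict.empty (fun bb =>
      bb.modify r.2.2.2 [] (fun tss => tss ++ [r.1])))

theorem lk1_shapeF (f : PySem.Dict String (PySem.Dict String (PySem.Dict String (List String)))) (c : String) :
    pvLk1 (pvShapeF f) c = pvShape2 (f.getD c PySem.Dict.empty) := by
  unfold pvLk1 pvShapeF PySem.Dict.getD
  rw [get?_eq_find?, List.find?_map]
  have hco : ((fun (p : String × List (String × List String)) => p.1 == c) ∘ (fun (p : String × PySem.Dict String (PySem.Dict String (List String))) => (p.1, pvShape2 p.2))) = (fun p => p.1 == c) := rfl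
  rw [hco]
  rcases h : f.items.find? (fun p => p.1 == c) with _ | p0
  · simp [h]; rfl
  · simp [h]

theorem any_shapeF (f : PySem.Dict String (PySem.Dict String (PySem.Dict String (List String)))) (c : String) :
    (pvShapeF f).any (fun p => p.1 == c) = f.items.any (fun p => p.1 == c) := by
  unfold pvShapeF
  rw [List.any_map]
  rfl

theorem shape_insF (f : PySem.Dict String (PySem.Dict String (PySem.Dict String (List String)))) (r : String × String × String × String) :
    pvShapeF (pvInsF f r) = pvIns (pvShapeF f) r.2.1 r.2.2.1 r.2.2.2 := by
  obtain ⟨ts, c, d, b⟩ := r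
  conv_lhs => rw [pvShapeF, pvInsF, items_modify]
  rw [pvIns, any_shapeF]
  by_cases h : f.items.any (fun p => p.1 == c) = true
  · rw [if_pos h, if_pos h]
    simp only [pvShapeF, List.map_map]
    apply List.map_congr_left
    intro p _
    by_cases hp : p.1 = c
    · simp only [Function.comp_apply, hp, beq_self_eq_true, if_true]
      rw [shape2_modify]
      exact congrArg (fun l => (c, pvIns2 l d b)) (lk1_shapeF f c).symm
    · simp [Function.comp, hp]
  · rw [if_neg h, if_neg h]
    simp only [List.map_append]
    rw [pvShapeF]
    congr 1

def pvLkO {β : Type} (l : List (String × β)) (c : String) : Option β :=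
  (l.find? (fun p => p.1 == c)).map (fun p => p.2)

theorem pvLk1_eq (g : List (String × List (String × List String))) (c : String) :
    pvLk1 g c = (pvLkO g c).getD [] := rfl

theorem pvLk2_eq (l : List (String × List String)) (d : String) :
    pvLk2 l d = (pvLkO l d).getD [] := rfl

theorem pvLkO_replace_self {β : Type} (g : List (String × β)) (c : String) (V : β)
    (h : g.any (fun p => p.1 == c) = true) :
    pvLkO (g.map (fun p => if p.1 == c then (c, V) else p)) c = some V := by
  unfold pvLkO
  rw [List.find?_map]
  have hco : ((fun (p : String × β) => p.1 == c) ∘ (fun p => if p.1 == c then (c, V) else p)) = (fun p => p.1 == c) := by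
    funext p
    by_cases hp : p.1 = c <;> simp [hp]
  rw [hco]
  rcases hf : g.find? (fun p => p.1 == c) with _ | p0
  · rw [List.find?_eq_none] at hf
    rcases List.any_eq_true.mp h with ⟨x, hx, hpx⟩
    exact absurd hpx (hf x hx)
  · have hp0 := List.find?_some hf
    have he : p0.1 = c := eq_of_beq hp0
    rw [hf]
    simp [he]

theorem pvLkO_replace_ne {β : Type} (g : List (String × β)) (c c' : String) (V : β)
    (h : c' ≠ c) :
    pvLkO (g.map (fun p => if p.1 == c then (c, V) else p)) c' = pvLkO g c' := by
  unfold pvLkO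
  rw [List.find?_map]
  have hco : ((fun (p : String × β) => p.1 == c') ∘ (fun p => if p.1 == c then (c, V) else p)) = (fun p => p.1 == c') := by
    funext p
    by_cases hp : p.1 = c
    · simp [hp]
    · simp [hp]
  rw [hco]
  rcases hf : g.find? (fun p => p.1 == c') with _ | p0
  · rw [hf]
    rfl
  · have hp0 := List.find?_some hf
    have hne : ¬ p0.1 = c := fun he => h (((eq_of_beq hp0).symm.trans he))
    rw [hf]
    simp [hne]

theorem pvLkO_append_self {β : Type} (g : List (String × β)) (c : String) (V : β)
    (h : g.any (fun p => p.1 == c) = false) :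
    pvLkO (g ++ [(c, V)]) c = some V := by
  unfold pvLkO
  rw [List.find?_append]
  have : g.find? (fun p => p.1 == c) = none := by
    rw [List.find?_eq_none]
    intro x hx
    simp [List.any_eq_false.mp h x hx]
  simp [this]

theorem pvLkO_append_ne {β : Type} (g : List (String × β)) (c c' : String) (V : β)
    (h : c' ≠ c) :
    pvLkO (g ++ [(c, V)]) c' = pvLkO g c' := by
  unfold pvLkO
  rw [List.find?_append]
  rcases hf : g.find? (fun p => p.1 == c') with _ | p0 <;> simp [hf, Ne.symm h]

theorem pvLkO_none_of_not_any {β : Type} (g : List (String × β)) (c : String)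
    (h : g.any (fun p => p.1 == c) = false) : pvLkO g c = none := by
  unfold pvLkO
  have : g.find? (fun p => p.1 == c) = none := by
    rw [List.find?_eq_none]
    intro x hx
    simp [List.any_eq_false.mp h x hx]
  simp [this]

theorem lkO_pvIns_self (g : List (String × List (String × List String))) (c d b : String) :
    pvLkO (pvIns g c d b) c = some (pvIns2 (pvLk1 g c) d b) := by
  unfold pvIns
  by_cases h : g.any (fun p => p.1 == c) = true
  · rw [if_pos h]
    exact pvLkO_replace_self g c _ h
  · have h' := eq_false_of_ne_true h
    rw [if_neg h, pvLkO_append_self g c _ h', pvLk1_eq, pvLkO_none_of_not_any g c h']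
    rfl

theorem lkO_pvIns_ne (g : List (String × List (String × List String))) (c d b c' : String)
    (h : c' ≠ c) : pvLkO (pvIns g c d b) c' = pvLkO g c' := by
  unfold pvIns
  by_cases hc : g.any (fun p => p.1 == c) = true
  · rw [if_pos hc]; exact pvLkO_replace_ne g c c' _ h
  · rw [if_neg hc]; exact pvLkO_append_ne g c c' _ h

theorem lkO_pvIns2_self (l : List (String × List String)) (d b : String) :
    pvLkO (pvIns2 l d b) d = some (pvIns3 (pvLk2 l d) b) := by
  unfold pvIns2
  by_cases h : l.any (fun q => q.1 == d) = true
  · rw [if_pos h]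
    exact pvLkO_replace_self l d _ h
  · have h' := eq_false_of_ne_true h
    rw [if_neg h, pvLkO_append_self l d _ h', pvLk2_eq, pvLkO_none_of_not_any l d h']
    rfl

theorem lkO_pvIns2_ne (l : List (String × List String)) (d b d' : String)
    (h : d' ≠ d) : pvLkO (pvIns2 l d b) d' = pvLkO l d' := by
  unfold pvIns2
  by_cases hc : l.any (fun q => q.1 == d) = true
  · rw [if_pos hc]; exact pvLkO_replace_ne l d d' _ h
  · rw [if_neg hc]; exact pvLkO_append_ne l d d' _ h

theorem mem_pvIns3 (ks : List String) (b b' : String) :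
    b' ∈ pvIns3 ks b ↔ b' ∈ ks ∨ b' = b := by
  unfold pvIns3
  by_cases h : ks.contains b = true
  · rw [if_pos h]
    have hb : b ∈ ks := by simpa [List.contains_eq_mem] using h
    constructor
    · exact Or.inl
    · rintro (hk | rfl)
      · exact hk
      · exact hb
  · rw [if_neg h]
    simp

def pvMemG (g : List (String × List (String × List String))) (c d b : String) : Prop :=
  b ∈ pvLk2 (pvLk1 g c) d

theorem memG_pvIns (g : List (String × List (String × List String))) (c d b c' d' b' : String) :
    pvMemG (pvIns g c d b) c' d' b' ↔ (pvMemG g c' d' b' ∨ (c' = c ∧ d' = d ∧ b' = b)) := by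
  unfold pvMemG
  by_cases hc : c' = c
  · subst hc
    rw [pvLk1_eq, lkO_pvIns_self]
    by_cases hd : d' = d
    · subst hd
      rw [Option.getD_some, pvLk2_eq, lkO_pvIns2_self, Option.getD_some, mem_pvIns3]
      rw [pvLk2_eq, pvLk1_eq]
      tauto
    · rw [Option.getD_some, pvLk2_eq, lkO_pvIns2_ne _ _ _ _ hd]
      rw [pvLk2_eq (pvLk1 g c') d', pvLk1_eq]
      tauto
  · rw [pvLk1_eq, lkO_pvIns_ne _ _ _ _ _ hc]
    rw [pvLk1_eq g c']
    tauto

theorem find?_key_unique {β : Type} (c : String) :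
    ∀ (l : List (String × β)), (l.map (fun p => p.1)).Nodup →
      ∀ p ∈ l, p.1 = c → l.find? (fun q => q.1 == c) = some p := by
  intro l
  induction l with
  | nil => intro _ p hp; simp at hp
  | cons q t ih =>
    intro hnd p hp hpc
    have hnd' : (q.1 :: t.map (fun p => p.1)).Nodup := by simpa using hnd
    rcases List.mem_cons.mp hp with rfl | hp'
    · exact List.find?_cons_of_pos (by simp [hpc])
    · have hq : ¬ (q.1 == c) = true := by
        simp only [beq_iff_eq]
        intro hqc
        have hmem : q.1 ∈ t.map (fun p => p.1) := by
          rw [hqc, ← hpc]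
          exact List.mem_map_of_mem hp'
        exact (List.nodup_cons.mp hnd').1 hmem
      rw [List.find?_cons_of_neg (p := fun r => r.1 == c) (l := t) (a := q) hq]
      exact ih (List.nodup_cons.mp hnd').2 p hp' hpc

def pvNod (g : List (String × List (String × List String))) : Prop :=
  (g.map (fun p => p.1)).Nodup ∧ ∀ p ∈ g, p.2 ≠ [] ∧ (p.2.map (fun q => q.1)).Nodup

theorem pvIns3_of_mem (ks : List String) (b : String) (h : b ∈ ks) : pvIns3 ks b = ks := by
  unfold pvIns3
  rw [if_pos (by simpa [List.contains_eq_mem] using h)]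

theorem pvIns2_of_mem (l : List (String × List String)) (d b : String)
    (hn : (l.map (fun q => q.1)).Nodup) (hm : b ∈ pvLk2 l d) : pvIns2 l d b = l := by
  rcases hf : l.find? (fun q => q.1 == d) with _ | q0
  · exfalso
    rw [pvLk2_eq] at hm
    unfold pvLkO at hm
    rw [hf] at hm
    simp at hm
  · have hq0b := List.find?_some hf
    have hq0d : q0.1 = d := eq_of_beq hq0b
    have hq0m : q0 ∈ l := List.mem_of_find?_eq_some hf
    have hlk : pvLk2 l d = q0.2 := by
      rw [pvLk2_eq]; unfold pvLkO; rw [hf]; rfl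
    have hany : l.any (fun q => q.1 == d) = true :=
      List.any_eq_true.mpr ⟨q0, hq0m, by simp [hq0d]⟩
    unfold pvIns2
    rw [if_pos hany]
    have : ∀ p ∈ l, (if p.1 == d then (d, pvIns3 (pvLk2 l d) b) else p) = p := by
      intro p hp
      by_cases hpd : p.1 = d
      · have := find?_key_unique d l hn p hp hpd
        rw [hf] at this
        injection this with hpq
        subst hpq
        rw [if_pos (by simp [hpd]), hlk, pvIns3_of_mem _ _ (hlk ▸ hm), ← hq0d]
      · rw [if_neg (by simp [hpd])]
    rw [List.map_congr_left this, List.map_id']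

theorem pvIns_of_mem (g : List (String × List (String × List String))) (c d b : String)
    (h : pvNod g) (hm : pvMemG g c d b) : pvIns g c d b = g := by
  unfold pvMemG at hm
  rcases hf : g.find? (fun p => p.1 == c) with _ | p0
  · exfalso
    rw [pvLk1_eq] at hm
    unfold pvLkO at hm
    rw [hf] at hm
    simp [pvLk2] at hm
  · have hp0b := List.find?_some hf
    have hp0c : p0.1 = c := eq_of_beq hp0b
    have hp0m : p0 ∈ g := List.mem_of_find?_eq_some hf
    have hlk : pvLk1 g c = p0.2 := by
      rw [pvLk1_eq]; unfold pvLkO; rw [hf]; rfl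
    have hany : g.any (fun p => p.1 == c) = true :=
      List.any_eq_true.mpr ⟨p0, hp0m, by simp [hp0c]⟩
    unfold pvIns
    rw [if_pos hany]
    have : ∀ p ∈ g, (if p.1 == c then (c, pvIns2 (pvLk1 g c) d b) else p) = p := by
      intro p hp
      by_cases hpc : p.1 = c
      · have := find?_key_unique c g h.1 p hp hpc
        rw [hf] at this
        injection this with hpq
        subst hpq
        rw [if_pos (by simp [hpc]), hlk,
          pvIns2_of_mem _ _ _ (h.2 p0 hp0m).2 (by rw [← hlk]; exact hm), ← hp0c]
      · rw [if_neg (by simp [hpc])]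
    rw [List.map_congr_left this, List.map_id']

theorem keys_map_rep {β : Type} (g : List (String × β)) (c : String) (V : β) :
    (g.map (fun p => if p.1 == c then (c, V) else p)).map (fun p => p.1) = g.map (fun p => p.1) := by
  rw [List.map_map]
  apply List.map_congr_left
  intro p _
  by_cases hp : p.1 = c <;> simp [hp]

theorem not_mem_keys_of_not_any {β : Type} (g : List (String × β)) (c : String)
    (h : g.any (fun p => p.1 == c) = false) : c ∉ g.map (fun p => p.1) := by
  intro hc
  rcases List.mem_map.mp hc with ⟨p, hp, he⟩
  have := List.any_eq_false.mp h p hp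
  simp [he] at this

theorem nod2_pvIns2 (l : List (String × List String)) (d b : String)
    (hn : (l.map (fun q => q.1)).Nodup) :
    pvIns2 l d b ≠ [] ∧ ((pvIns2 l d b).map (fun q => q.1)).Nodup := by
  unfold pvIns2
  by_cases h : l.any (fun q => q.1 == d) = true
  · rcases l with _ | ⟨q, t⟩
    · exact absurd h (by simp)
    · rw [if_pos h]
      refine ⟨by simp, ?_⟩
      rw [keys_map_rep]
      exact hn
  · rw [if_neg h]
    refine ⟨by simp, ?_⟩
    rw [List.map_append]
    simp only [List.map_cons, List.map_nil]
    rw [List.nodup_append]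
    refine ⟨hn, List.nodup_singleton d, ?_⟩
    intro a ha x hx
    rw [List.mem_singleton] at hx
    exact fun he => not_mem_keys_of_not_any l d (eq_false_of_ne_true h) ((he.trans hx) ▸ ha)

theorem nod_pvIns (g : List (String × List (String × List String))) (c d b : String)
    (h : pvNod g) : pvNod (pvIns g c d b) := by
  unfold pvIns
  by_cases hc : g.any (fun p => p.1 == c) = true
  · rw [if_pos hc]
    constructor
    · rw [keys_map_rep]
      exact h.1
    · intro p' hp'
      rcases List.mem_map.mp hp' with ⟨p, hp, he⟩
      by_cases hpc : p.1 = c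
      · rw [← he, if_pos (by simp [hpc])]
        rcases hf : g.find? (fun p => p.1 == c) with _ | p0
        · exfalso
          rw [List.find?_eq_none] at hf
          rcases List.any_eq_true.mp hc with ⟨x, hx, hxc⟩
          exact hf x hx hxc
        · have hlk : pvLk1 g c = p0.2 := by
            rw [pvLk1_eq]; unfold pvLkO; rw [hf]; rfl
          have hp0 := h.2 p0 (List.mem_of_find?_eq_some hf)
          rw [hlk]
          exact nod2_pvIns2 p0.2 d b hp0.2
      · rw [← he, if_neg (by simp [hpc])]
        exact h.2 p hp
  · rw [if_neg hc]
    constructor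
    · rw [List.map_append]
      simp only [List.map_cons, List.map_nil]
      rw [List.nodup_append]
      refine ⟨h.1, List.nodup_singleton c, ?_⟩
      intro a ha x hx
      rw [List.mem_singleton] at hx
      exact fun he => not_mem_keys_of_not_any g c (eq_false_of_ne_true hc) ((he.trans hx) ▸ ha)
    · intro p hp
      rcases List.mem_append.mp hp with hp | hp
      · exact h.2 p hp
      · rw [List.mem_singleton] at hp
        subst hp
        exact ⟨by simp, by simp⟩

def pvRenderD (g : List (String × List (String × List String))) : List (String × PySem.Dict String Int) :=
  g.map (fun p => (p.1, PySem.Dict.mk (p.2.map (fun q => (q.1, (q.2.length : Int))))))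

theorem any_render (g : List (String × List (String × List String))) (c : String) :
    (pvRenderD g).any (fun p => p.1 == c) = g.any (fun p => p.1 == c) := by
  unfold pvRenderD
  rw [List.any_map]
  rfl

theorem any_qfun (l : List (String × List String)) (d : String) :
    (l.map (fun q => (q.1, (q.2.length : Int)))).any (fun q => q.1 == d) = l.any (fun q => q.1 == d) := by
  rw [List.any_map]
  rfl

theorem getD_render (g : List (String × List (String × List String))) (c : String) :
    (PySem.Dict.mk (pvRenderD g)).getD c PySem.Dict.empty =
      PySem.Dict.mk ((pvLk1 g c).map (fun q => (q.1, (q.2.length : Int)))) := by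
  unfold PySem.Dict.getD pvRenderD
  rw [get?_eq_find?]
  show ((List.find? (fun p => p.1 == c) (g.map (fun p => (p.1, PySem.Dict.mk (p.2.map (fun q => (q.1, (q.2.length : Int)))))))).map (fun p => p.2)).getD PySem.Dict.empty = _
  rw [List.find?_map]
  have hco : ((fun (p : String × PySem.Dict String Int) => p.1 == c) ∘ (fun (p : String × List (String × List String)) => (p.1, PySem.Dict.mk (p.2.map (fun q => (q.1, (q.2.length : Int))))))) = (fun p => p.1 == c) := rfl
  rw [hco]
  rcases hf : g.find? (fun p => p.1 == c) with _ | p0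
  · rw [hf, pvLk1_eq]
    unfold pvLkO
    rw [hf]
    rfl
  · rw [hf, pvLk1_eq]
    unfold pvLkO
    rw [hf]
    rfl

theorem getD_qfun_some (l : List (String × List String)) (d : String) (q0 : String × List String)
    (hf : l.find? (fun q => q.1 == d) = some q0) :
    (PySem.Dict.mk (l.map (fun q => (q.1, (q.2.length : Int))))).getD d 0 = (q0.2.length : Int) := by
  unfold PySem.Dict.getD
  rw [get?_eq_find?]
  show ((List.find? (fun q => q.1 == d) (l.map (fun q => (q.1, (q.2.length : Int))))).map (fun q => q.2)).getD 0 = _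
  rw [List.find?_map]
  have hco : ((fun (q : String × Int) => q.1 == d) ∘ (fun (q : String × List String) => (q.1, (q.2.length : Int)))) = (fun q => q.1 == d) := rfl
  rw [hco, hf]
  rfl

theorem render2_pvIns2 (l : List (String × List String)) (d b : String)
    (hm : b ∉ pvLk2 l d) :
    PySem.Dict.mk ((pvIns2 l d b).map (fun q => (q.1, (q.2.length : Int)))) =
      (PySem.Dict.mk (l.map (fun q => (q.1, (q.2.length : Int))))).modify d 0 (fun n => n + 1) := by
  apply PySem.Dict.ext
  rw [items_modify]
  show _ = if (l.map (fun q => (q.1, (q.2.length : Int)))).any (fun q => q.1 == d) = true then _ else _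
  rw [any_qfun]
  unfold pvIns2
  by_cases h : l.any (fun q => q.1 == d) = true
  · rw [if_pos h, if_pos h]
    rcases hf : l.find? (fun q => q.1 == d) with _ | q0
    · exfalso
      rw [List.find?_eq_none] at hf
      rcases List.any_eq_true.mp h with ⟨x, hx, hxd⟩
      exact hf x hx hxd
    · have hlk : pvLk2 l d = q0.2 := by
        rw [pvLk2_eq]; unfold pvLkO; rw [hf]; rfl
      rw [getD_qfun_some l d q0 hf]
      simp only [List.map_map]
      apply List.map_congr_left
      intro q _
      by_cases hq : q.1 = d
      · simp only [Function.comp_apply, hq, beq_self_eq_true, if_true]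
        rw [hlk] at hm ⊢
        unfold pvIns3
        rw [if_neg (by simpa [List.contains_eq_mem] using hm)]
        simp
      · simp [Function.comp, hq]
  · rw [if_neg h, if_neg h]
    simp

theorem render_pvIns (g : List (String × List (String × List String))) (c d b : String)
    (hm : ¬ pvMemG g c d b) :
    PySem.Dict.mk (pvRenderD (pvIns g c d b)) =
      (PySem.Dict.mk (pvRenderD g)).modify c PySem.Dict.empty (fun cc => cc.modify d 0 (fun n => n + 1)) := by
  apply PySem.Dict.ext
  rw [items_modify]
  show _ = if (pvRenderD g).any (fun p => p.1 == c) = true then _ else _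
  rw [any_render]
  unfold pvIns
  by_cases h : g.any (fun p => p.1 == c) = true
  · rw [if_pos h, if_pos h]
    rcases hf : g.find? (fun p => p.1 == c) with _ | p0
    · exfalso
      rw [List.find?_eq_none] at hf
      rcases List.any_eq_true.mp h with ⟨x, hx, hxc⟩
      exact hf x hx hxc
    · have hlk : pvLk1 g c = p0.2 := by
        rw [pvLk1_eq]; unfold pvLkO; rw [hf]; rfl
      rw [getD_render]
      unfold pvRenderD
      simp only [List.map_map]
      apply List.map_congr_left
      intro p _
      by_cases hp : p.1 = c
      · simp only [Function.comp_apply, hp, beq_self_eq_true, if_true]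
        rw [render2_pvIns2 _ _ _ (by unfold pvMemG at hm; exact hm)]
      · simp [Function.comp, hp]
  · rw [if_neg h, if_neg h]
    unfold pvRenderD
    rw [List.map_append]
    congr 1

def pvCounterize (f : PySem.Dict String (PySem.Dict String (PySem.Dict String (List String)))) : PySem.Dict String (PySem.Dict String Int) :=
  f.items.foldl (fun ctr p =>
    p.2.items.foldl (fun ctr q =>
      ctr.modify p.1 PySem.Dict.empty (fun cc =>
        cc.modify q.1 0 (fun n => n + (q.2.keys.length : Int)))) ctr) PySem.Dict.empty

theorem counterize_as_shape (f : PySem.Dict String (PySem.Dict String (PySem.Dict String (List String)))) :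
    pvCounterize f = (pvShapeF f).foldl (fun ctr p =>
      p.2.foldl (fun ctr q =>
        ctr.modify p.1 PySem.Dict.empty (fun cc =>
          cc.modify q.1 0 (fun n => n + (q.2.length : Int)))) ctr) PySem.Dict.empty := by
  unfold pvCounterize pvShapeF
  rw [List.foldl_map]
  congr 1
  funext ctr p
  unfold pvShape2
  rw [List.foldl_map]

theorem any_last_true {β : Type} (pre : List (String × β)) (c : String) (v : β) :
    (pre ++ [(c, v)]).any (fun p => p.1 == c) = true := by
  rw [List.any_append]
  simp

theorem getD_append_last {β : Type} (pre : List (String × β)) (c : String) (v dflt : β)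
    (h : c ∉ pre.map (fun p => p.1)) :
    (PySem.Dict.mk (pre ++ [(c, v)])).getD c dflt = v := by
  unfold PySem.Dict.getD
  rw [get?_eq_find?]
  show ((List.find? (fun p => p.1 == c) (pre ++ [(c, v)])).map (fun p => p.2)).getD dflt = v
  rw [List.find?_append]
  have hpre : pre.find? (fun p => p.1 == c) = none := by
    rw [List.find?_eq_none]
    intro x hx
    simp only [beq_iff_eq]
    intro he
    exact h (he ▸ List.mem_map_of_mem hx)
  rw [hpre]
  simp

theorem map_replace_append_last {β : Type} (pre : List (String × β)) (c : String) (v w : β)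
    (h : c ∉ pre.map (fun p => p.1)) :
    (pre ++ [(c, v)]).map (fun p => if p.1 == c then (c, w) else p) = pre ++ [(c, w)] := by
  rw [List.map_append]
  congr 1
  · apply (List.map_congr_left _).trans (List.map_id' _)
    intro p hp
    have : ¬ p.1 = c := fun he => h (he ▸ List.mem_map_of_mem hp)
    rw [if_neg (by simp [this])]
  · simp

theorem foldG_inner (c : String) (pre : List (String × PySem.Dict String Int))
    (hc : c ∉ pre.map (fun p => p.1)) :
    ∀ (ds : List (String × List String)) (cc : PySem.Dict String Int),
      (ds.map (fun q => q.1)).Nodup → (∀ q ∈ ds, cc.contains q.1 = false) →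
      ds.foldl (fun ctr q => ctr.modify c PySem.Dict.empty (fun cc => cc.modify q.1 0 (fun n => n + (q.2.length : Int))))
        (PySem.Dict.mk (pre ++ [(c, cc)])) =
      PySem.Dict.mk (pre ++ [(c, PySem.Dict.mk (cc.items ++ ds.map (fun q => (q.1, (q.2.length : Int)))))]) := by
  intro ds
  induction ds with
  | nil =>
    intro cc _ _
    simp
  | cons q ds' ih =>
    intro cc hnd hfresh
    have hnd' : q.1 ∉ ds'.map (fun q => q.1) ∧ (ds'.map (fun q => q.1)).Nodup := by
      simpa using hnd
    rw [List.foldl_cons]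
    have hstep : (PySem.Dict.mk (pre ++ [(c, cc)])).modify c PySem.Dict.empty (fun cc => cc.modify q.1 0 (fun n => n + (q.2.length : Int))) =
        PySem.Dict.mk (pre ++ [(c, PySem.Dict.mk (cc.items ++ [(q.1, (q.2.length : Int))]))]) := by
      apply PySem.Dict.ext
      rw [items_modify]
      show (if (pre ++ [(c, cc)]).any (fun p => p.1 == c) = true then _ else _) = _
      rw [any_last_true, if_pos rfl, getD_append_last pre c cc PySem.Dict.empty hc]
      have : cc.modify q.1 0 (fun n => n + (q.2.length : Int)) = PySem.Dict.mk (cc.items ++ [(q.1, (q.2.length : Int))]) := by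
        apply PySem.Dict.ext
        rw [items_modify]
        show (if cc.items.any (fun p => p.1 == q.1) = true then _ else _) = _
        rw [if_neg (by rw [← contains_eq_any]; simp [hfresh q (by simp)])]
        norm_num
      rw [← this]
      exact map_replace_append_last pre c cc _ hc
    rw [hstep]
    rw [ih (PySem.Dict.mk (cc.items ++ [(q.1, (q.2.length : Int))])) hnd'.2 ?_]
    · simp
    · intro q' hq'
      show (cc.items ++ [(q.1, (q.2.length : Int))]).any (fun p => p.1 == q'.1) = false
      rw [List.any_append]
      have h1 : cc.items.any (fun p => p.1 == q'.1) = false := by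
        rw [← contains_eq_any]
        exact hfresh q' (by simp [hq'])
      have h2 : ¬ q.1 = q'.1 := by
        intro he
        exact hnd'.1 (he ▸ List.mem_map_of_mem hq')
      rw [h1]
      simp [h2]

theorem foldG_outer :
    ∀ (g : List (String × List (String × List String))) (ctr : PySem.Dict String (PySem.Dict String Int)),
      pvNod g → (∀ p ∈ g, ctr.contains p.1 = false) →
      g.foldl (fun ctr p =>
        p.2.foldl (fun ctr q =>
          ctr.modify p.1 PySem.Dict.empty (fun cc =>
            cc.modify q.1 0 (fun n => n + (q.2.length : Int)))) ctr) ctr =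
      PySem.Dict.mk (ctr.items ++ pvRenderD g) := by
  intro g
  induction g with
  | nil =>
    intro ctr _ _
    simp [pvRenderD]
  | cons p g' ih =>
    intro ctr hnod hfresh
    obtain ⟨c, l⟩ := p
    have hlne : l ≠ [] := (hnod.2 (c, l) (by simp)).1
    have hlnd : (l.map (fun q => q.1)).Nodup := (hnod.2 (c, l) (by simp)).2
    rcases l with _ | ⟨q0, l'⟩
    · exact absurd rfl hlne
    rw [List.foldl_cons]
    have hcfresh : ctr.contains c = false := hfresh (c, q0 :: l') (by simp)
    have hcpre : c ∉ ctr.items.map (fun p => p.1) := by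
      intro hmem
      rw [contains_eq_any] at hcfresh
      rcases List.mem_map.mp hmem with ⟨x, hx, he⟩
      have := List.any_eq_false.mp hcfresh x hx
      simp [he] at this
    have hinner : (PySem.Dict.empty : PySem.Dict String Int).modify q0.1 0 (fun n => n + (q0.2.length : Int)) =
        PySem.Dict.mk [(q0.1, (q0.2.length : Int))] := by
      apply PySem.Dict.ext
      rw [items_modify]
      show (if (PySem.Dict.empty : PySem.Dict String Int).items.any (fun p => p.1 == q0.1) = true then _ else _) = _
      rw [if_neg (by simp [PySem.Dict.empty])]
      show [] ++ [(q0.1, 0 + (q0.2.length : Int))] = _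
      norm_num
    have hstep1 : ctr.modify c PySem.Dict.empty (fun cc => cc.modify q0.1 0 (fun n => n + (q0.2.length : Int))) =
        PySem.Dict.mk (ctr.items ++ [(c, PySem.Dict.mk [(q0.1, (q0.2.length : Int))])]) := by
      apply PySem.Dict.ext
      rw [items_modify]
      show (if ctr.items.any (fun p => p.1 == c) = true then _ else _) = _
      rw [if_neg (by rw [← contains_eq_any, hcfresh]; simp), hinner]
    have hnd' : q0.1 ∉ l'.map (fun q => q.1) ∧ (l'.map (fun q => q.1)).Nodup := by
      simpa using hlnd
    have hsplit : ((q0 :: l').foldl (fun ctr q => ctr.modify c PySem.Dict.empty (fun cc => cc.modify q.1 0 (fun n => n + (q.2.length : Int)))) ctr) =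
        (l'.foldl (fun ctr q => ctr.modify c PySem.Dict.empty (fun cc => cc.modify q.1 0 (fun n => n + (q.2.length : Int))))
          (PySem.Dict.mk (ctr.items ++ [(c, PySem.Dict.mk [(q0.1, (q0.2.length : Int))])]))) := by
      rw [List.foldl_cons, hstep1]
    rw [hsplit]
    have hfr1 : ∀ q' ∈ l', (PySem.Dict.mk [(q0.1, (q0.2.length : Int))]).contains q'.1 = false := by
      intro q' hq'
      show ([(q0.1, (q0.2.length : Int))].any (fun x => x.1 == q'.1)) = false
      have h2 : ¬ q0.1 = q'.1 := fun he => hnd'.1 (he ▸ List.mem_map_of_mem hq')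
      simp [h2]
    rw [foldG_inner c ctr.items hcpre l' (PySem.Dict.mk [(q0.1, (q0.2.length : Int))]) hnd'.2 hfr1]
    have hgnd : c ∉ g'.map (fun p => p.1) ∧ (g'.map (fun p => p.1)).Nodup := by
      simpa using hnod.1
    have hnod' : pvNod g' := ⟨hgnd.2, fun p hp => hnod.2 p (by simp [hp])⟩
    have hfresh' : ∀ p ∈ g',
        (PySem.Dict.mk (ctr.items ++ [(c, PySem.Dict.mk ((PySem.Dict.mk [(q0.1, (q0.2.length : Int))]).items ++ l'.map (fun q => (q.1, (q.2.length : Int)))))])).contains p.1 = false := by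
      intro p hp
      show ((ctr.items ++ _).any (fun x => x.1 == p.1)) = false
      rw [List.any_append]
      have h1 : ctr.items.any (fun x => x.1 == p.1) = false := by
        rw [← contains_eq_any]
        exact hfresh p (by simp [hp])
      have h2 : ¬ c = p.1 := fun he => hgnd.1 (he ▸ List.mem_map_of_mem hp)
      rw [h1]
      simp [h2]
    rw [ih _ hnod' hfresh']
    apply PySem.Dict.ext
    show (ctr.items ++ [(c, _)]) ++ pvRenderD g' = ctr.items ++ pvRenderD ((c, q0 :: l') :: g')
    rw [List.append_assoc]
    congr 1

theorem counterize_render (f : PySem.Dict String (PySem.Dict String (PySem.Dict String (List String))))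
    (h : pvNod (pvShapeF f)) :
    pvCounterize f = PySem.Dict.mk (pvRenderD (pvShapeF f)) := by
  rw [counterize_as_shape]
  rw [foldG_outer (pvShapeF f) PySem.Dict.empty h (fun p _ => rfl)]
  rfl

def pvStepB (st : PySem.Set (String × String × String) × PySem.Dict String (PySem.Dict String Int)) (r : String × String × String × String) : PySem.Set (String × String × String) × PySem.Dict String (PySem.Dict String Int) :=
  let triple : String × String × String := (r.2.1, r.2.2.1, r.2.2.2)
  if st.1.contains triple then st
  else (st.1.add triple,
        st.2.modify r.2.1 PySem.Dict.empty (fun cc => cc.modify r.2.2.1 0 (fun n => n + 1)))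

def pvFoldB (results : List (String × String × String × String)) : PySem.Set (String × String × String) × PySem.Dict String (PySem.Dict String Int) :=
  results.foldl pvStepB (([] : PySem.Set (String × String × String)), PySem.Dict.empty)

def pvFoldF (results : List (String × String × String × String)) : PySem.Dict String (PySem.Dict String (PySem.Dict String (List String))) :=
  results.foldl pvInsF PySem.Dict.empty

theorem pvMaster (results : List (String × String × String × String)) :
    pvNod (pvShapeF (pvFoldF results)) ∧
    (∀ t : String × String × String, ((pvFoldB results).1.contains t = true ↔ pvMemG (pvShapeF (pvFoldF results)) t.1 t.2.1 t.2.2)) ∧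
    (pvFoldB results).2 = PySem.Dict.mk (pvRenderD (pvShapeF (pvFoldF results))) := by
  induction results using List.reverseRecOn with
  | nil =>
    refine ⟨⟨List.nodup_nil, by simp [pvShapeF, pvFoldF, PySem.Dict.empty]⟩, ?_, rfl⟩
    intro t
    simp [pvFoldB, pvFoldF, pvShapeF, PySem.Dict.empty, pvMemG, pvLk1, pvLk2]
  | append_singleton rs x ih =>
    obtain ⟨ihN, ihS, ihC⟩ := ih
    obtain ⟨ts, c, d, b⟩ := x
    have hF : pvFoldF (rs ++ [(ts, c, d, b)]) = pvInsF (pvFoldF rs) (ts, c, d, b) := by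
      unfold pvFoldF
      rw [List.foldl_append]
      rfl
    have hB : pvFoldB (rs ++ [(ts, c, d, b)]) = pvStepB (pvFoldB rs) (ts, c, d, b) := by
      unfold pvFoldB
      rw [List.foldl_append]
      rfl
    rw [hF, hB, shape_insF (pvFoldF rs) (ts, c, d, b)]
    show pvNod (pvIns (pvShapeF (pvFoldF rs)) c d b) ∧ _ ∧ _
    by_cases h : (pvFoldB rs).1.contains (c, d, b) = true
    · have hmem : pvMemG (pvShapeF (pvFoldF rs)) c d b := (ihS (c, d, b)).mp h
      rw [pvIns_of_mem _ _ _ _ ihN hmem]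
      have hst : pvStepB (pvFoldB rs) (ts, c, d, b) = pvFoldB rs := by
        unfold pvStepB
        rw [if_pos h]
      rw [hst]
      exact ⟨ihN, ihS, ihC⟩
    · have hmem : ¬ pvMemG (pvShapeF (pvFoldF rs)) c d b := fun hm => h ((ihS (c, d, b)).mpr hm)
      have hst : pvStepB (pvFoldB rs) (ts, c, d, b) =
          ((pvFoldB rs).1.add (c, d, b),
           (pvFoldB rs).2.modify c PySem.Dict.empty (fun cc => cc.modify d 0 (fun n => n + 1))) := by
        unfold pvStepB
        rw [if_neg h]
      rw [hst]
      refine ⟨nod_pvIns _ _ _ _ ihN, ?_, ?_⟩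
      · intro t
        have hadd : (pvFoldB rs).1.add (c, d, b) = (pvFoldB rs).1 ++ [(c, d, b)] := by
          unfold PySem.Set.add
          rw [if_neg h]
        rw [hadd]
        rw [PySem.Set.contains_iff, memG_pvIns]
        rw [List.mem_append, List.mem_singleton]
        rw [← ihS t, PySem.Set.contains_iff]
        obtain ⟨t1, t2, t3⟩ := t
        simp only [Prod.mk.injEq]
      · show (pvFoldB rs).2.modify c PySem.Dict.empty (fun cc => cc.modify d 0 (fun n => n + 1)) = _
        rw [ihC, ← render_pvIns _ _ _ _ hmem]

-- the ports as the named folds above (definitional)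
theorem count_bad_blocks_eq (results : List (String × String × String × String)) :
    count_bad_blocks results = (pvCounterize (pvFoldF results)).items.map (fun p => (p.1, p.2.items)) := rfl

theorem count_bad_blocks_alt_eq (results : List (String × String × String × String)) :
    count_bad_blocks_alt results = (pvFoldB results).2.items.map (fun p => (p.1, p.2.items)) := rfl

-- ===== VERDICT (by name: the statement is the Claim_ definition above) =====
theorem count_bad_blocks_spec : Claim_equal_count_bad_blocks := by
  intro results _
  unfold Spec_count_bad_blocks
  obtain ⟨hnod, _, hctr⟩ := pvMaster results
  rw [count_bad_blocks_eq, count_bad_blocks_alt_eq, counterize_render _ hnod, hctr]
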